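-- pv_equiv track=rewrite | github.com/CRISITPI/DLW2 | dlw/views/views.py | findthis
-- ===== SOURCE A (Python) =====
-- def findthis(request,temp):
--     templist=[]
--     asci=temp
--     ascil=[ord(cc) for cc in asci]
--     thr=[]
--     for i in range(len(ascil)):
--         if ascil[i]==13:
--             thr.append(i)
--     k=0
--     for i in range(len(thr)):
--         s=''.join(chr(ascil[d]) for d in range(k,thr[i]))
--         lis=[13,10]
--         if len(s)>0 and s!=''.join(chr(i) for i in lis):
--             k=thr[i]+2
--             templist.append(s)
--     s=''.join(chr(ascil[d]) for d in range(k,len(ascil)))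
--     if len(s)>0:
--         templist.append(s)
--     return templist
-- ===== SOURCE B (Python) =====
-- def findthis(request, temp):
--     out = []
--     k = 0
--     for i, c in enumerate(temp):
--         if c == '\r':
--             s = temp[k:i]
--             if s and s != '\r\n':
--                 out.append(s)
--                 k = i + 2
--     tail = temp[k:]
--     if tail:
--         out.append(tail)
--     return out
-- ===== Notes on version B (the rewrite author's own statement) =====
-- stated objective: faster
-- what changed: Replaced A's three passes (ord-code list, separate CR-index collection, and per-segment strings rebuilt character-by-character via chr/join generators) with a single left-to-right scan that tracks the current segment start and emits direct string slices.
import Mathlib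
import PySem

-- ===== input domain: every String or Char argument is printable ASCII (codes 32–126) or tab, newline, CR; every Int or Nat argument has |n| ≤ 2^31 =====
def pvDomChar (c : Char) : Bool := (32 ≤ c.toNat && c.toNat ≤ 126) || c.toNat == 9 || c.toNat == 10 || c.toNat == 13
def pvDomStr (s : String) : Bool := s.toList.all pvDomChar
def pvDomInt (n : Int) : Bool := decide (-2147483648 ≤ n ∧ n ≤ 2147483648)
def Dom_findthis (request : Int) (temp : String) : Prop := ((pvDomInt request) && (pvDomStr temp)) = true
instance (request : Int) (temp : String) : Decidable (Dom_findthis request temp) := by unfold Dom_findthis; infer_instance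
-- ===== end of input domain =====

-- B replaces A's three passes (ord-code list, CR-index list, per-segment chr-joins) by one
-- left-to-right scan emitting slices; objective: faster (constant factor), same return value.

-- ===== PORT A =====
-- Transliteration of A. All indices (k, thr entries) are nonnegative Python ints, kept as Nat.
-- ''.join(chr(ascil[d]) for d in range(a, b)) is ported as the List Char it builds
-- (String.ofList at the append site); range(a,b) with a,b ≥ 0 is List.range' a (b - a).
def findthisStep (ascil : List Nat) (st : Nat × List String) (t : Nat) : Nat × List String :=
  let s : List Char := (List.range' st.1 (t - st.1)).map (fun d => Char.ofNat (ascil.getD d 0))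
  if s.length > 0 ∧ s ≠ [Char.ofNat 13, Char.ofNat 10] then (t + 2, st.2 ++ [String.ofList s])
  else st

def findthis (request : Int) (temp : String) : List String :=
  let ascil : List Nat := temp.toList.map Char.toNat          -- [ord(cc) for cc in asci]
  let thr : List Nat := (List.range ascil.length).foldl
    (fun acc i => if ascil.getD i 0 = 13 then acc ++ [i] else acc) []
  let st := thr.foldl (findthisStep ascil) (0, [])            -- k=0; for i in range(len(thr)): …
  let s : List Char := (List.range' st.1 (ascil.length - st.1)).map
    (fun d => Char.ofNat (ascil.getD d 0))                    -- s = temp[k:] rebuilt from codes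
  if s.length > 0 then st.2 ++ [String.ofList s] else st.2

-- ===== PORT B =====
-- Transliteration of Source B: one pass over the characters (enumerate ported as an index
-- counter in the fold state), slicing temp[k:i] directly; state = (i, k, out).
def findthisAltStep (cs : List Char) (st : Nat × Nat × List String) (c : Char) :
    Nat × Nat × List String :=
  if c = '\r' then
    let s : List Char := (cs.drop st.2.1).take (st.1 - st.2.1)   -- temp[k:i], 0 ≤ k, i
    if s ≠ [] ∧ s ≠ ['\r', '\n'] then (st.1 + 1, st.1 + 2, st.2.2 ++ [String.ofList s])
    else (st.1 + 1, st.2.1, st.2.2)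
  else (st.1 + 1, st.2.1, st.2.2)

def findthis_alt (request : Int) (temp : String) : List String :=
  let cs := temp.toList
  let st := cs.foldl (findthisAltStep cs) (0, 0, [])
  let tail := cs.drop st.2.1                                     -- temp[k:]
  if tail ≠ [] then st.2.2 ++ [String.ofList tail] else st.2.2

-- ===== PRECONDITION & SPEC =====
def Spec_findthis (request : Int) (temp : String) (out : List String) : Prop := out = findthis_alt request temp
instance (request : Int) (temp : String) (out : List String) : Decidable (Spec_findthis request temp out) := by unfold Spec_findthis; infer_instance

-- ===== CLAIM (what is proved, stated in full; the proofs are below) =====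
def Claim_equal_findthis : Prop := ∀ (request : Int) (temp : String), Dom_findthis request temp → Spec_findthis request temp (findthis request temp)

-- ===== LEMMAS AND PROOFS =====

-- A's per-segment rebuild from ord codes is the plain slice cs[k:t].
theorem slice_of_codes (cs : List Char) (k t : Nat) (ht : t ≤ cs.length) :
    (List.range' k (t - k)).map (fun d => Char.ofNat ((cs.map Char.toNat).getD d 0))
      = (cs.drop k).take (t - k) := by
  apply List.ext_getElem
  · simp; omega
  · intro j h1 h2
    have hlt : k + j < cs.length := by simp [List.length_range'] at h1; omega
    simp [List.getElem_range', hlt, Char.ofNat_toNat]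

-- pair step acting on (k, out) at a CR position
def pairStep (cs : List Char) (st : Nat × List String) (p : Char × Nat) : Nat × List String :=
  if p.1 = '\r' then
    let s : List Char := (cs.drop st.1).take (p.2 - st.1)
    if s ≠ [] ∧ s ≠ ['\r', '\n'] then (p.2 + 2, st.2 ++ [String.ofList s]) else st
  else st

theorem alt_fold_zipIdx (cs l : List Char) (i0 k : Nat) (out : List String) :
    l.foldl (findthisAltStep cs) (i0, k, out)
      = (i0 + l.length, (l.zipIdx i0).foldl (pairStep cs) (k, out)) := by
  induction l generalizing i0 k out with
  | nil => simp
  | cons c rest ih =>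
    have hstep : ∀ st : Nat × Nat × List String,
        findthisAltStep cs st c = (st.1 + 1, pairStep cs st.2 (c, st.1)) := by
      intro st
      simp only [findthisAltStep, pairStep]
      by_cases hc : c = '\r'
      · simp only [hc]
        split_ifs <;> rfl
      · simp only [if_neg hc]
    simp only [List.foldl_cons, List.zipIdx_cons, List.length_cons, hstep]
    rw [ih]
    exact Prod.ext (by omega) rfl

theorem pair_fold_filter (cs : List Char) (l : List (Char × Nat)) (st : Nat × List String) :
    l.foldl (pairStep cs) st
      = ((l.filter (fun p => p.1 = '\r')).map (·.2)).foldl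
          (fun st i => pairStep cs st ('\r', i)) st := by
  induction l generalizing st with
  | nil => rfl
  | cons p rest ih =>
    by_cases hp : p.1 = '\r'
    · simp only [List.foldl_cons, List.filter_cons, hp, decide_true, List.map_cons, if_pos]
      rw [ih]
      congr 1
      have : p = ('\r', p.2) := Prod.ext hp rfl
      rw [← this]
    · simp only [List.foldl_cons, List.filter_cons, hp, decide_false, Bool.false_eq_true,
        if_false]
      rw [show pairStep cs st p = st from by simp only [pairStep, if_neg hp], ih]

theorem zipIdx_crs (cs : List Char) :
    ((cs.zipIdx 0).filter (fun p => p.1 = '\r')).map (·.2)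
      = (List.range cs.length).filter (fun i => decide ((cs.map Char.toNat).getD i 0 = 13)) := by
  have h1 : cs.zipIdx 0 = (List.range cs.length).map (fun j => (cs.getD j ' ', j)) := by
    apply List.ext_getElem
    · simp
    · intro j hj _
      simp at hj
      simp [List.getElem_zipIdx, hj]
  rw [h1, List.filter_map, List.map_map]
  have h2 : ((fun p : Char × Nat => p.2) ∘ fun j => (cs.getD j ' ', j)) = id := rfl
  rw [h2, List.map_id]
  apply List.filter_congr
  intro i hi
  simp only [List.mem_range] at hi
  simp only [Function.comp, List.getD_eq_getElem _ _ hi,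
    List.getD_eq_getElem _ _ (by simpa using hi : i < (cs.map Char.toNat).length),
    List.getElem_map]
  apply decide_eq_decide.mpr
  constructor
  · intro h; rw [h]; rfl
  · intro h
    have := congrArg Char.ofNat h
    simpa [Char.ofNat_toNat] using this

-- ===== VERDICT (by name: the statement is the Claim_ definition above) =====
theorem findthis_spec : Claim_equal_findthis := by
  intro request temp _
  show findthis request temp = findthis_alt request temp
  simp only [findthis, findthis_alt, List.length_map]
  rw [PySem.List.foldl_append_ite_eq_filter, List.nil_append,
    alt_fold_zipIdx, pair_fold_filter, zipIdx_crs]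
  have hchars : [Char.ofNat 13, Char.ofNat 10] = ['\r', '\n'] := by decide
  have hfold :
      ((List.range temp.toList.length).filter
          (fun i => decide ((temp.toList.map Char.toNat).getD i 0 = 13))).foldl
        (findthisStep (temp.toList.map Char.toNat)) (0, [])
      = ((List.range temp.toList.length).filter
          (fun i => decide ((temp.toList.map Char.toNat).getD i 0 = 13))).foldl
        (fun st i => pairStep temp.toList st ('\r', i)) (0, []) := by
    apply PySem.List.foldl_congr_mem
    intro st i hi
    have hlt : i < temp.toList.length := List.mem_range.mp (List.mem_of_mem_filter hi)
    simp only [findthisStep, pairStep, reduceIte]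
    rw [slice_of_codes temp.toList st.1 i (le_of_lt hlt), hchars]
    exact if_congr (and_congr List.length_pos_iff Iff.rfl) rfl rfl
  rw [hfold]
  rw [slice_of_codes temp.toList _ temp.toList.length le_rfl]
  set st := ((List.range temp.toList.length).filter
      (fun i => decide ((temp.toList.map Char.toNat).getD i 0 = 13))).foldl
    (fun st i => pairStep temp.toList st ('\r', i)) (0, ([] : List String)) with hst
  simp only []
  rw [show temp.toList.length - st.1 = (temp.toList.drop st.1).length from
    (List.length_drop).symm, List.take_length]
  exact if_congr (by rw [List.length_range']; exact List.length_pos_iff) rfl rfl
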